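-- pv_equiv track=rewrite | github.com/tiagoaoa/ribault-release | scripts/dyck/plot.py | _select_imbs
-- ===== SOURCE A (Python) =====
-- def _select_imbs(byN):
--     """Select representative IMB values from available data."""
--     all_imbs = sorted({imb for N in byN for P in byN[N] for imb in byN[N][P]})
--     if not all_imbs:
--         return []
--     targets = [0, 25, 50, 75, 100]
--     selected = []
--     for t in targets:
--         closest = min(all_imbs, key=lambda x: abs(x - t))
--         if closest not in selected:
--             selected.append(closest)
--     return selected
-- ===== SOURCE B (Python) =====
-- def _bisect_left(xs, t, lo, hi):
--     """Leftmost insertion index of t in sorted xs[lo:hi], by recursive binary search."""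
--     if lo >= hi:
--         return lo
--     mid = (lo + hi) // 2
--     if xs[mid] < t:
--         return _bisect_left(xs, t, mid + 1, hi)
--     return _bisect_left(xs, t, lo, mid)
--
--
-- def _closest(xs, t):
--     """Value in sorted, duplicate-free, non-empty xs closest to t (ties -> lower value)."""
--     i = _bisect_left(xs, t, 0, len(xs))
--     if i == 0:
--         return xs[0]
--     if i == len(xs):
--         return xs[-1]
--     a = xs[i - 1]
--     b = xs[i]
--     return a if t - a <= b - t else b
--
--
-- def _select_imbs(byN):
--     """Select representative IMB values from available data."""
--     imbs = set()
--     for N in byN: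
--         for P in byN[N]:
--             imbs.update(byN[N][P])
--     all_imbs = sorted(imbs)
--     if not all_imbs:
--         return []
--     selected = []
--     for t in (0, 25, 50, 75, 100):
--         c = _closest(all_imbs, t)
--         if c not in selected:
--             selected.append(c)
--     return selected
-- ===== Notes on version B (the rewrite author's own statement) =====
-- stated objective: alternative
-- what changed: Each target's closest value is found by recursive binary search (bisect_left) on the sorted list plus a two-neighbour comparison with lower-value tie-break, instead of a full linear min(..., key=abs) scan per target; the set is built by explicit update loops instead of a comprehension.
import Mathlib
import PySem

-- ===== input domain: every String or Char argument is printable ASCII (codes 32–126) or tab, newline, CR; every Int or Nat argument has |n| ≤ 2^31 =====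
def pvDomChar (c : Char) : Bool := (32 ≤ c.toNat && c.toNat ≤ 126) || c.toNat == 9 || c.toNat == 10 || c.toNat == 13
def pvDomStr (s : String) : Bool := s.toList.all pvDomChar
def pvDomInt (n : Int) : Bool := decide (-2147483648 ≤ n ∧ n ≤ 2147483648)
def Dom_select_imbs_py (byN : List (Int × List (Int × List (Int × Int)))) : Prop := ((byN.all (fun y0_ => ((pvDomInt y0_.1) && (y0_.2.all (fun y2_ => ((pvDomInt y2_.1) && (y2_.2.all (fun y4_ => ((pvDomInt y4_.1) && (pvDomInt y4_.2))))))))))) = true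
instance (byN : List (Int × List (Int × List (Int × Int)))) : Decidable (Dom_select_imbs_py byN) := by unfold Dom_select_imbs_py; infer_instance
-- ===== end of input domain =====

-- B replaces A's per-target linear min(..., key=abs) scan by a recursive binary search plus a
-- two-neighbour comparison (lower value on distance ties), and builds the set by explicit loops.

-- ===== PORT A =====
-- literal transliteration of _select_imbs: set comprehension over the nested dicts, sorted,
-- then for each target min(all_imbs, key=lambda x: abs(x - t)) with append-if-new dedup.
def select_imbs_py (byN : List (Int × List (Int × List (Int × Int)))) : List Int :=
  let all_imbs : List Int :=
    PySem.List.sorted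
      (PySem.Set.ofList
        (byN.flatMap (fun NP =>
          ((PySem.Dict.getD ⟨byN⟩ NP.1 [] : List (Int × List (Int × Int)))).flatMap (fun PV =>
            ((PySem.Dict.getD ⟨PySem.Dict.getD ⟨byN⟩ NP.1 []⟩ PV.1 [] : List (Int × Int))).map Prod.fst))))
      (fun x => x) false
  if all_imbs = [] then []
  else
    [(0 : Int), 25, 50, 75, 100].foldl
      (fun selected t =>
        match PySem.List.min? all_imbs (fun x => |x - t|) with
        | some closest => if closest ∈ selected then selected else selected ++ [closest]
        | none => selected)   -- unreachable: all_imbs ≠ [] in this branch (Python's min never raises here)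
      []

-- ===== PORT B =====
-- _bisect_left(xs, t, lo, hi) from Source B: recursive binary search (xs[mid] in range whenever hi ≤ len xs)
def pvBisect (xs : List Int) (t : Int) (lo hi : Nat) : Nat :=
  if lo < hi then
    let mid := (lo + hi) / 2
    if xs.getD mid 0 < t then pvBisect xs t (mid + 1) hi
    else pvBisect xs t lo mid
  else lo
termination_by hi - lo
decreasing_by all_goals omega

-- _closest(xs, t) from Source B (indices in range whenever xs ≠ [])
def pvClosest (xs : List Int) (t : Int) : Int :=
  let i := pvBisect xs t 0 xs.length
  if i = 0 then xs.getD 0 0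
  else if i = xs.length then xs.getD (xs.length - 1) 0
  else
    let a := xs.getD (i - 1) 0
    let b := xs.getD i 0
    if t - a ≤ b - t then a else b

-- literal transliteration of Source B's _select_imbs
def select_imbs_py_alt (byN : List (Int × List (Int × List (Int × Int)))) : List Int :=
  let imbs : PySem.Set Int :=
    byN.foldl (fun acc NP =>
      ((PySem.Dict.getD ⟨byN⟩ NP.1 [] : List (Int × List (Int × Int)))).foldl (fun acc2 PV =>
        PySem.Set.update acc2
          ((PySem.Dict.getD ⟨PySem.Dict.getD ⟨byN⟩ NP.1 []⟩ PV.1 [] : List (Int × Int)).map Prod.fst)) acc)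
      PySem.Set.empty
  let all_imbs : List Int := PySem.List.sorted imbs (fun x => x) false
  if all_imbs = [] then []
  else
    [(0 : Int), 25, 50, 75, 100].foldl
      (fun selected t =>
        let c := pvClosest all_imbs t
        if c ∈ selected then selected else selected ++ [c])
      []

-- ===== PRECONDITION & SPEC =====
def Spec_select_imbs_py (byN : List (Int × List (Int × List (Int × Int)))) (out : List Int) : Prop := out = select_imbs_py_alt byN
instance (byN : List (Int × List (Int × List (Int × Int)))) (out : List Int) : Decidable (Spec_select_imbs_py byN out) := by unfold Spec_select_imbs_py; infer_instance

-- ===== CLAIM (what is proved, stated in full; the proofs are below) =====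
def Claim_equal_select_imbs_py : Prop := ∀ (byN : List (Int × List (Int × List (Int × Int)))), Dom_select_imbs_py byN → Spec_select_imbs_py byN (select_imbs_py byN)

-- ===== LEMMAS AND PROOFS =====

-- folding Set.update over each block equals one Set.update of the flattened list
theorem set_update_foldl_flatMap {α : Type} (g : α → List Int) (l : List α) (s : PySem.Set Int) :
    l.foldl (fun acc x => PySem.Set.update acc (g x)) s = PySem.Set.update s (l.flatMap g) := by
  induction l generalizing s with
  | nil => simp [PySem.Set.update]
  | cons a l ih =>
      simp only [List.foldl_cons, List.flatMap_cons, ih]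
      simp [PySem.Set.update, List.foldl_append]

-- the two set constructions agree
theorem sets_eq (byN : List (Int × List (Int × List (Int × Int)))) :
    (byN.foldl (fun acc NP =>
      ((PySem.Dict.getD ⟨byN⟩ NP.1 [] : List (Int × List (Int × Int)))).foldl (fun acc2 PV =>
        PySem.Set.update acc2
          ((PySem.Dict.getD ⟨PySem.Dict.getD ⟨byN⟩ NP.1 []⟩ PV.1 [] : List (Int × Int)).map Prod.fst)) acc)
      PySem.Set.empty)
    = PySem.Set.ofList
        (byN.flatMap (fun NP =>
          ((PySem.Dict.getD ⟨byN⟩ NP.1 [] : List (Int × List (Int × Int)))).flatMap (fun PV =>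
            ((PySem.Dict.getD ⟨PySem.Dict.getD ⟨byN⟩ NP.1 []⟩ PV.1 [] : List (Int × Int))).map Prod.fst))) := by
  have h : ∀ acc, (byN.foldl (fun acc NP =>
      ((PySem.Dict.getD ⟨byN⟩ NP.1 [] : List (Int × List (Int × Int)))).foldl (fun acc2 PV =>
        PySem.Set.update acc2
          ((PySem.Dict.getD ⟨PySem.Dict.getD ⟨byN⟩ NP.1 []⟩ PV.1 [] : List (Int × Int)).map Prod.fst)) acc) acc)
      = PySem.Set.update acc (byN.flatMap (fun NP =>
          ((PySem.Dict.getD ⟨byN⟩ NP.1 [] : List (Int × List (Int × Int)))).flatMap (fun PV =>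
            ((PySem.Dict.getD ⟨PySem.Dict.getD ⟨byN⟩ NP.1 []⟩ PV.1 [] : List (Int × Int))).map Prod.fst))) := by
    intro acc
    have hF : (fun (acc : PySem.Set Int) (NP : Int × List (Int × List (Int × Int))) =>
        ((PySem.Dict.getD ⟨byN⟩ NP.1 [] : List (Int × List (Int × Int)))).foldl (fun acc2 PV =>
          PySem.Set.update acc2
            ((PySem.Dict.getD ⟨PySem.Dict.getD ⟨byN⟩ NP.1 []⟩ PV.1 [] : List (Int × Int)).map Prod.fst)) acc)
        = fun acc NP => PySem.Set.update acc
            (((PySem.Dict.getD ⟨byN⟩ NP.1 [] : List (Int × List (Int × Int)))).flatMap (fun PV =>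
              ((PySem.Dict.getD ⟨PySem.Dict.getD ⟨byN⟩ NP.1 []⟩ PV.1 [] : List (Int × Int))).map Prod.fst)) := by
      funext acc NP
      exact set_update_foldl_flatMap _ _ acc
    rw [hF]
    exact set_update_foldl_flatMap _ _ acc
  rw [h PySem.Set.empty]
  simp [PySem.Set.update, PySem.Set.empty, PySem.Set.ofList_eq_foldl]

-- a fold of min?'s step keeps the current minimum if nothing beats it
theorem min_step_stable {α : Type} (key : α → Int) (l : List α) (m : α)
    (h : ∀ y ∈ l, key m ≤ key y) :
    l.foldl (fun acc x => match acc with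
      | none => some x
      | some m => if key x < key m then some x else some m) (some m) = some m := by
  induction l with
  | nil => rfl
  | cons a l ih =>
      have ha : ¬ key a < key m := not_lt.mpr (h a (by simp))
      simp only [List.foldl_cons, ha, if_false]
      exact ih (fun y hy => h y (by simp [hy]))

-- Python's min picks the FIRST minimum: if m strictly beats everything before it and
-- weakly beats everything after it, min? returns m
theorem foldl_step_split {α : Type} (key : α → Int) (l₁ l₂ : List α) (m : α) (acc : Option α)
    (hacc : ∀ a, acc = some a → key m < key a)
    (h1 : ∀ y ∈ l₁, key m < key y) (h2 : ∀ y ∈ l₂, key m ≤ key y) :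
    (l₁ ++ m :: l₂).foldl (fun acc x => match acc with
      | none => some x
      | some m => if key x < key m then some x else some m) acc = some m := by
  induction l₁ generalizing acc with
  | nil =>
      cases acc with
      | none => simpa using min_step_stable key l₂ m h2
      | some b => simpa [hacc b rfl] using min_step_stable key l₂ m h2
  | cons a l₁ ih =>
      have ha : key m < key a := h1 a (by simp)
      have hstep : ∀ b, (match acc with
          | none => some a
          | some b => if key a < key b then some a else some b) = some b → key m < key b := by
        intro b hb
        cases acc with
        | none => simp at hb; exact hb ▸ ha
        | some c =>
            by_cases hc : key a < key c
            · simp [hc] at hb; exact hb ▸ ha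
            · simp [hc] at hb; exact hb ▸ hacc c rfl
      simpa using ih _ hstep (fun y hy => h1 y (by simp [hy]))

-- Python's min picks the FIRST minimum: if m strictly beats everything before it and
-- weakly beats everything after it, min? returns m
theorem min?_of_split {α : Type} (key : α → Int) (l₁ l₂ : List α) (m : α)
    (h1 : ∀ y ∈ l₁, key m < key y) (h2 : ∀ y ∈ l₂, key m ≤ key y) :
    PySem.List.min? (l₁ ++ m :: l₂) key = some m := by
  exact foldl_step_split key l₁ l₂ m none (by intro a h; cases h) h1 h2

-- specification of the recursive binary search on a (weakly) sorted list
theorem pvBisect_spec (xs : List Int) (t : Int) (hs : List.Pairwise (· ≤ ·) xs) :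
    ∀ (lo hi : Nat), hi ≤ xs.length → lo ≤ hi →
    lo ≤ pvBisect xs t lo hi ∧ pvBisect xs t lo hi ≤ hi ∧
    (∀ j (hj : j < xs.length), lo ≤ j → j < pvBisect xs t lo hi → xs[j] < t) ∧
    (∀ j (hj : j < xs.length), pvBisect xs t lo hi ≤ j → j < hi → t ≤ xs[j]) := by
  have hsg := List.pairwise_iff_getElem.mp hs
  intro lo hi
  induction hn : hi - lo using Nat.strong_induction_on generalizing lo hi with
  | _ n ih =>
  intro hhi hlh
  rw [pvBisect]
  by_cases hlt : lo < hi
  · simp only [hlt, if_true]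
    have hmid1 : lo ≤ (lo + hi) / 2 := by omega
    have hmid2 : (lo + hi) / 2 < hi := by omega
    have hmlen : (lo + hi) / 2 < xs.length := by omega
    have hget : xs.getD ((lo + hi) / 2) 0 = xs[(lo + hi) / 2] := List.getD_eq_getElem xs 0 hmlen
    by_cases hc : xs.getD ((lo + hi) / 2) 0 < t
    · simp only [hc, if_true]
      obtain ⟨i1, i2, i3, i4⟩ := ih (hi - ((lo + hi) / 2 + 1)) (by omega) ((lo + hi) / 2 + 1) hi rfl hhi (by omega)
      refine ⟨by omega, i2, ?_, i4⟩
      intro j hj hjl hjr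
      by_cases hj2 : (lo + hi) / 2 + 1 ≤ j
      · exact i3 j hj hj2 hjr
      · have hle : xs[j] ≤ xs[(lo + hi) / 2] := by
          rcases Nat.lt_or_ge j ((lo + hi) / 2) with h | h
          · exact hsg j ((lo + hi) / 2) hj hmlen h
          · have : j = (lo + hi) / 2 := by omega
            subst this; exact le_refl _
        rw [hget] at hc; omega
    · simp only [hc, if_false]
      obtain ⟨i1, i2, i3, i4⟩ := ih (((lo + hi) / 2) - lo) (by omega) lo ((lo + hi) / 2) rfl (by omega) hmid1
      refine ⟨i1, by omega, i3, ?_⟩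
      intro j hj hjl hjr
      by_cases hj2 : j < (lo + hi) / 2
      · exact i4 j hj hjl hj2
      · have hle : xs[(lo + hi) / 2] ≤ xs[j] := by
          rcases Nat.lt_or_ge ((lo + hi) / 2) j with h | h
          · exact hsg ((lo + hi) / 2) j hmlen hj h
          · have : j = (lo + hi) / 2 := by omega
            subst this; exact le_refl _
        rw [hget] at hc; omega
  · simp only [hlt, if_false]
    exact ⟨le_refl _, hlh, fun j hj h1 h2 => absurd (lt_of_le_of_lt h1 h2) (by omega),
           fun j hj h1 h2 => absurd (lt_of_lt_of_le (lt_of_le_of_lt h1 (by omega)) (le_refl hi)) (by omega)⟩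

-- members of take/drop as indexed elements
theorem mem_take_idx {α : Type} {xs : List α} {k : Nat} {y : α} (h : y ∈ xs.take k) :
    ∃ j, ∃ hj : j < xs.length, j < k ∧ xs[j] = y := by
  obtain ⟨j, hj, hy⟩ := List.mem_iff_getElem.mp h
  refine ⟨j, ?_, ?_, ?_⟩
  · have := hj; simp [List.length_take] at this; omega
  · have := hj; simp [List.length_take] at this; omega
  · rw [← hy]; exact (List.getElem_take).symm

theorem mem_drop_idx {α : Type} {xs : List α} {k : Nat} {y : α} (h : y ∈ xs.drop k) :
    ∃ j, ∃ hj : j < xs.length, k ≤ j ∧ xs[j] = y := by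
  obtain ⟨j, hj, hy⟩ := List.mem_iff_getElem.mp h
  have hl : k + j < xs.length := by simp [List.length_drop] at hj; omega
  refine ⟨k + j, hl, by omega, ?_⟩
  rw [← hy]; exact (List.getElem_drop).symm

-- split a list at index k
theorem take_getElem_drop {α : Type} (xs : List α) (k : Nat) (hk : k < xs.length) :
    xs = xs.take k ++ xs[k] :: xs.drop (k + 1) := by
  conv_lhs => rw [← List.take_append_drop k xs]
  rw [List.getElem_cons_drop hk]

-- pvClosest computes exactly Python's min(xs, key=lambda x: abs(x - t)) on a strictly sorted non-empty list
theorem min?_abs_eq_closest (xs : List Int) (t : Int)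
    (hne : xs ≠ []) (hs : List.Pairwise (· < ·) xs) :
    PySem.List.min? xs (fun x => |x - t|) = some (pvClosest xs t) := by
  have hsle : List.Pairwise (· ≤ ·) xs := hs.imp (fun h => le_of_lt h)
  have hsg := List.pairwise_iff_getElem.mp hs
  have hn : 0 < xs.length := List.length_pos_iff.mpr hne
  obtain ⟨h1, h2, h3, h4⟩ := pvBisect_spec xs t hsle 0 xs.length (le_refl _) (by omega)
  set i := pvBisect xs t 0 xs.length with hi
  have habs_lt : ∀ y : Int, y < t → |y - t| = t - y := fun y hy => by
    rw [abs_of_nonpos (by omega)]; ring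
  have habs_ge : ∀ y : Int, t ≤ y → |y - t| = y - t := fun y hy => by
    rw [abs_of_nonneg (by omega)]
  unfold pvClosest
  rw [← hi]
  by_cases hi0 : i = 0
  · -- i = 0: every element is ≥ t, the first element is closest
    rw [if_pos hi0]
    rw [List.getD_eq_getElem xs 0 hn]
    have hmin := min?_of_split (fun x => |x - t|) (xs.take 0) (xs.drop (0 + 1)) xs[0]
      (by intro y hy; obtain ⟨j, hj, hjk, hjy⟩ := mem_take_idx hy; omega)
      (by
        intro y hy
        obtain ⟨j, hj, hjk, hjy⟩ := mem_drop_idx hy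
        have ht0 : t ≤ xs[0] := h4 0 hn (by omega) hn
        have hty : t ≤ xs[j] := h4 j hj (by omega) hj
        have : xs[0] ≤ xs[j] := by
          rcases Nat.eq_zero_or_pos j with h | h
          · subst h; exact le_refl _
          · exact le_of_lt (hsg 0 j hn hj h)
        simp only [← hjy]
        rw [habs_ge _ ht0, habs_ge _ hty]; omega)
    rw [← take_getElem_drop xs 0 hn] at hmin
    exact hmin
  · by_cases hin : i = xs.length
    · -- i = len: every element is < t, the last element is the strictly closest
      rw [if_neg hi0, if_pos hin]
      have hlast : xs.length - 1 < xs.length := by omega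
      rw [List.getD_eq_getElem xs 0 hlast]
      have hmin := min?_of_split (fun x => |x - t|) (xs.take (xs.length - 1))
          (xs.drop (xs.length - 1 + 1)) xs[xs.length - 1]
        (by
          intro y hy
          obtain ⟨j, hj, hjk, hjy⟩ := mem_take_idx hy
          have hyt : xs[j] < t := h3 j hj (by omega) (by omega)
          have hlt : xs[xs.length - 1] < t := h3 _ hlast (by omega) (by omega)
          have : xs[j] < xs[xs.length - 1] := hsg j _ hj hlast (by omega)
          simp only [← hjy]
          rw [habs_lt _ hlt, habs_lt _ hyt]; omega)
        (by
          intro y hy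
          obtain ⟨j, hj, hjk, hjy⟩ := mem_drop_idx hy
          omega)
      rw [← take_getElem_drop xs (xs.length - 1) hlast] at hmin
      exact hmin
    · -- 0 < i < len: a = xs[i-1] < t ≤ xs[i] = b; pick the nearer, the lower value on ties
      rw [if_neg hi0, if_neg hin]
      have hi1 : i - 1 < xs.length := by omega
      have hii : i < xs.length := by omega
      have ha : xs.getD (i - 1) 0 = xs[i - 1] := List.getD_eq_getElem xs 0 hi1
      have hb : xs.getD i 0 = xs[i] := List.getD_eq_getElem xs 0 hii
      have hat : xs[i - 1] < t := h3 (i - 1) hi1 (by omega) (by omega)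
      have hbt : t ≤ xs[i] := h4 i hii (le_refl _) hii
      rw [ha, hb]
      by_cases hcmp : t - xs[i - 1] ≤ xs[i] - t
      · -- choose a = xs[i-1], at index i-1
        rw [if_pos hcmp]
        have hmin := min?_of_split (fun x => |x - t|) (xs.take (i - 1)) (xs.drop (i - 1 + 1)) xs[i - 1]
          (by
            intro y hy
            obtain ⟨j, hj, hjk, hjy⟩ := mem_take_idx hy
            have hyt : xs[j] < t := h3 j hj (by omega) (by omega)
            have : xs[j] < xs[i - 1] := hsg j (i - 1) hj hi1 (by omega)
            simp only [← hjy]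
            rw [habs_lt _ hat, habs_lt _ hyt]; omega)
          (by
            intro y hy
            obtain ⟨j, hj, hjk, hjy⟩ := mem_drop_idx hy
            have hji : i ≤ j := by omega
            have hty : t ≤ xs[j] := h4 j hj hji hj
            have : xs[i] ≤ xs[j] := by
              rcases Nat.lt_or_ge i j with h | h
              · exact le_of_lt (hsg i j hii hj h)
              · have : j = i := by omega
                subst this; exact le_refl _
            simp only [← hjy]
            rw [habs_lt _ hat, habs_ge _ hty]; omega)
        rw [← take_getElem_drop xs (i - 1) hi1] at hmin
        exact hmin
      · -- choose b = xs[i], at index i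
        rw [if_neg hcmp]
        have hmin := min?_of_split (fun x => |x - t|) (xs.take i) (xs.drop (i + 1)) xs[i]
          (by
            intro y hy
            obtain ⟨j, hj, hjk, hjy⟩ := mem_take_idx hy
            have hyt : xs[j] < t := h3 j hj (by omega) (by omega)
            have : xs[j] ≤ xs[i - 1] := by
              rcases Nat.lt_or_ge j (i - 1) with h | h
              · exact le_of_lt (hsg j (i - 1) hj hi1 h)
              · have : j = i - 1 := by omega
                subst this; exact le_refl _
            simp only [← hjy]
            rw [habs_ge _ hbt, habs_lt _ hyt]; omega)
          (by
            intro y hy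
            obtain ⟨j, hj, hjk, hjy⟩ := mem_drop_idx hy
            have hty : t ≤ xs[j] := h4 j hj (by omega) hj
            have : xs[i] ≤ xs[j] := by
              rcases Nat.lt_or_ge i j with h | h
              · exact le_of_lt (hsg i j hii hj h)
              · have : j = i := by omega
                subst this; exact le_refl _
            simp only [← hjy]
            rw [habs_ge _ hbt, habs_ge _ hty]; omega)
        rw [← take_getElem_drop xs i hii] at hmin
        exact hmin

-- the selection folds agree once the list of candidates is a sorted duplicate-free set
theorem fold_eq (S : List Int) (hnd : S.Nodup) :
    (if PySem.List.sorted S (fun x => x) false = [] then ([] : List Int) else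
      [(0 : Int), 25, 50, 75, 100].foldl
        (fun selected t =>
          match PySem.List.min? (PySem.List.sorted S (fun x => x) false) (fun x => |x - t|) with
          | some closest => if closest ∈ selected then selected else selected ++ [closest]
          | none => selected) [])
    = (if PySem.List.sorted S (fun x => x) false = [] then ([] : List Int) else
      [(0 : Int), 25, 50, 75, 100].foldl
        (fun selected t =>
          if pvClosest (PySem.List.sorted S (fun x => x) false) t ∈ selected then selected
          else selected ++ [pvClosest (PySem.List.sorted S (fun x => x) false) t]) []) := by
  set xs := PySem.List.sorted S (fun x => x) false with hxs
  by_cases hnil : xs = []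
  · simp [hnil]
  · simp only [hnil, if_false]
    have hnd' : xs.Nodup := ((PySem.List.sorted_perm S (fun x => x) false).nodup_iff).mpr hnd
    have hple : List.Pairwise (· ≤ ·) xs := PySem.List.sorted_pairwise S (fun x => x)
    have hplt : List.Pairwise (· < ·) xs := by
      rw [List.pairwise_iff_getElem] at hple ⊢
      intro p q hp hq hpq
      have hle := hple p q hp hq hpq
      have hne : xs[p] ≠ xs[q] := by
        intro h
        have := (List.Nodup.getElem_inj_iff hnd').mp h
        omega
      omega
    apply PySem.List.foldl_congr_mem
    intro selected t _
    rw [min?_abs_eq_closest xs t hnil hplt]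

-- ===== VERDICT (by name: the statement is the Claim_ definition above) =====
theorem select_imbs_py_spec : Claim_equal_select_imbs_py := by
  intro byN _
  unfold Spec_select_imbs_py select_imbs_py select_imbs_py_alt
  rw [sets_eq byN]
  exact fold_eq _ (PySem.Set.nodup_ofList _)
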